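-- pv_equiv track=rewrite | github.com/wzygxr/shuati | class023_Heap/Code13_RearrangeString.py | _is_valid_reorganization
-- ===== SOURCE A (Python) =====
-- from collections import Counter
--
-- def _is_valid_reorganization(original: str, reorganized: str) -> bool:
--     """
--     验证重构后的字符串是否有效：
--     1. 长度与原字符串相同
--     2. 相邻字符不同
--     3. 包含原字符串的所有字符
--     """
--     # 检查是否为空字符串且原字符串不为空
--     if not reorganized and original:
--         # 检查是否真的无法重构
--         char_count = Counter(original)
--         max_count = max(char_count.values())
--         return max_count > (len(original) + 1) // 2
--
--     # 检查长度
--     if len(original) != len(reorganized):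
--         return False
--
--     # 检查相邻字符是否不同
--     for i in range(1, len(reorganized)):
--         if reorganized[i] == reorganized[i-1]:
--             return False
--
--     # 检查字符频率是否匹配
--     return Counter(original) == Counter(reorganized)
-- ===== SOURCE B (Python) =====
-- def _max_freq(chars):
--     if not chars:
--         return 0
--     c = chars[0]
--     return max(chars.count(c), _max_freq([x for x in chars[1:] if x != c]))
--
--
-- def _is_valid_reorganization(original: str, reorganized: str) -> bool:
--     if not reorganized and original:
--         return _max_freq(list(original)) > (len(original) + 1) // 2
--     if len(original) != len(reorganized):
--         return False
--     if any(a == b for a, b in zip(reorganized, reorganized[1:])):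
--         return False
--     return sorted(original) == sorted(reorganized)
-- ===== Notes on version B (the rewrite author's own statement) =====
-- stated objective: alternative
-- what changed: Multiset comparison is done by sorting both strings and comparing the sorted lists instead of building and comparing Counter dicts; the adjacent-duplicate loop becomes a zip over consecutive pairs; and the max character frequency in the empty-reorganized branch is computed by a recursion on the distinct characters (count the head, filter it out, recurse) instead of max over Counter values.
import Mathlib
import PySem

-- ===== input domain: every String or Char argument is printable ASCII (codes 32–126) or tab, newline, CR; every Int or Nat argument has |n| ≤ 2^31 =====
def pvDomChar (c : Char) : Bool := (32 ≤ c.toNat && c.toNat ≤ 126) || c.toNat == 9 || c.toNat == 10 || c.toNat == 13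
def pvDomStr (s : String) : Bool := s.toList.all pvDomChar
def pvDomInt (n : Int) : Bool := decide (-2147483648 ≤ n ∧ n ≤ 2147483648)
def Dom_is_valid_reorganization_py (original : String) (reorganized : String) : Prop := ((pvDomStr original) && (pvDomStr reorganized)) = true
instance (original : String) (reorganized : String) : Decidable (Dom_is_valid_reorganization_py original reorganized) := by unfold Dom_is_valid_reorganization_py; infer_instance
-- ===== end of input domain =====

-- B replaces Counter-equality with sort-and-compare, the index loop with a zip over
-- consecutive pairs, and the max Counter value with a count/filter recursion (alternative
-- decomposition of similar cost).


-- ===== PORT A =====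
def is_valid_reorganization_py (original : String) (reorganized : String) : Bool :=
  if reorganized.toList.isEmpty && !original.toList.isEmpty then
    -- char_count = Counter(original); max_count = max(char_count.values())
    match PySem.List.max? (PySem.Dict.counter original.toList).values (fun v => v) with
    | none => false   -- unreachable here: original ≠ "" (Python's max would raise on an empty sequence)
    | some maxCount => decide (PySem.Int.floordiv ((original.toList.length : Int) + 1) 2 < maxCount)
  else if (original.toList.length : Int) ≠ (reorganized.toList.length : Int) then false
  else if (PySem.List.pyRange 1 (reorganized.toList.length : Int) 1).any
      (fun i => PySem.List.pyGet? reorganized.toList i == PySem.List.pyGet? reorganized.toList (i - 1)) then false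
  else
    -- Counter(original) == Counter(reorganized): Python dict ==, i.e. same keys, same values
    PySem.Set.equal (PySem.Dict.counter original.toList).keys (PySem.Dict.counter reorganized.toList).keys
      && (PySem.Dict.counter original.toList (κ := Char)).keys.all
          (fun k => (PySem.Dict.counter original.toList).getD k 0 == (PySem.Dict.counter reorganized.toList).getD k 0)

-- ===== PORT B =====
def pvMaxFreq : List Char → Int
  | [] => 0
  | c :: t => max (((c :: t).count c : Nat) : Int) (pvMaxFreq (t.filter (fun x => !(x == c))))
termination_by l => l.length
decreasing_by
  simp only [List.length_cons, List.length_unattach]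
  exact Nat.lt_succ_of_le (le_trans (List.length_filter_le _ _) (by simp))

def is_valid_reorganization_py_alt (original : String) (reorganized : String) : Bool :=
  if reorganized.toList.isEmpty && !original.toList.isEmpty then
    decide (PySem.Int.floordiv ((original.toList.length : Int) + 1) 2 < pvMaxFreq original.toList)
  else if (original.toList.length : Int) ≠ (reorganized.toList.length : Int) then false
  else if (reorganized.toList.zip (reorganized.toList.drop 1)).any (fun p => p.1 == p.2) then false
  else decide (PySem.List.sorted original.toList (fun x => x) false = PySem.List.sorted reorganized.toList (fun x => x) false)

-- ===== PRECONDITION & SPEC =====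
def Spec_is_valid_reorganization_py (original : String) (reorganized : String) (out : Bool) : Prop := out = is_valid_reorganization_py_alt original reorganized
instance (original : String) (reorganized : String) (out : Bool) : Decidable (Spec_is_valid_reorganization_py original reorganized out) := by unfold Spec_is_valid_reorganization_py; infer_instance

-- ===== CLAIM (what is proved, stated in full; the proofs are below) =====
def Claim_equal_is_valid_reorganization_py : Prop := ∀ (original : String) (reorganized : String), Dom_is_valid_reorganization_py original reorganized → Spec_is_valid_reorganization_py original reorganized (is_valid_reorganization_py original reorganized)

-- ===== LEMMAS AND PROOFS =====

-- pvMaxFreq l bounds every character count of l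
theorem pvMaxFreq_ub (l : List Char) : ∀ c ∈ l, ((l.count c : Nat) : Int) ≤ pvMaxFreq l := by
  induction hn : l.length using Nat.strong_induction_on generalizing l with
  | _ n ih =>
  match l with
  | [] => intro c hc; simp at hc
  | a :: t =>
    intro c hc
    rw [pvMaxFreq]
    by_cases hca : c = a
    · subst hca; exact le_max_left _ _
    · refine le_trans ?_ (le_max_right _ _)
      have hct : c ∈ t := by
        rcases List.mem_cons.mp hc with h | h
        · exact absurd h hca
        · exact h
      have hmem : c ∈ t.filter (fun x => !(x == a)) := by
        simp [List.mem_filter, hct, hca]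
      have hlt : (t.filter (fun x => !(x == a))).length < n := by
        subst hn
        simp only [List.length_cons]
        exact Nat.lt_succ_of_le (List.length_filter_le _ _)
      have hle := ih _ hlt _ rfl c hmem
      rw [List.count_filter (by simp [hca])] at hle
      simpa [List.count_cons, Ne.symm hca] using hle

theorem pvMaxFreq_mem (l : List Char) (h : l ≠ []) : ∃ c ∈ l, ((l.count c : Nat) : Int) = pvMaxFreq l := by
  induction hn : l.length using Nat.strong_induction_on generalizing l with
  | _ n ih =>
  match l with
  | [] => exact absurd rfl h
  | a :: t =>
    rw [pvMaxFreq]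
    by_cases hr : t.filter (fun x => !(x == a)) = []
    · refine ⟨a, by simp, ?_⟩
      rw [hr]
      simp only [pvMaxFreq]
      have h1 : (1:Int) ≤ (((a :: t).count a : Nat) : Int) := by
        have := List.count_pos_iff.mpr (show a ∈ a :: t by simp)
        exact_mod_cast this
      omega
    · have hlt : (t.filter (fun x => !(x == a))).length < n := by
        subst hn
        simp only [List.length_cons]
        exact Nat.lt_succ_of_le (List.length_filter_le _ _)
      rcases le_or_gt (pvMaxFreq (t.filter (fun x => !(x == a)))) (((a :: t).count a : Nat) : Int) with hle | hlt2
      · exact ⟨a, by simp, by rw [max_eq_left hle]⟩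
      · obtain ⟨c, hc, hcnt⟩ := ih _ hlt _ hr rfl
        have hmf := List.mem_filter.mp hc
        have hca : c ≠ a := by
          intro e
          rw [e] at hmf
          simp at hmf
        refine ⟨c, by simp [hmf.1], ?_⟩
        have e1 : List.count c (a :: t) = List.count c (t.filter (fun x => !(x == a))) := by
          rw [List.count_filter (by simp [hca])]
          simp [Ne.symm hca]
        rw [e1, hcnt, max_eq_right (le_of_lt hlt2)]

theorem maxA_eq_maxFreq (l : List Char) (h : l ≠ []) :
    PySem.List.max? (PySem.Dict.counter l (κ := Char)).values (fun v => v) = some (pvMaxFreq l) := by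
  have hvals : (PySem.Dict.counter l (κ := Char)).values
      = (PySem.Set.ofList l).map (fun k => (l.count k : Int)) := by
    show ((PySem.Dict.counter l (κ := Char)).items).map (·.2) = _
    rw [PySem.Dict.items_counter]
    simp [List.map_map, Function.comp]
  have hne : (PySem.Dict.counter l (κ := Char)).values ≠ [] := by
    rw [hvals]
    rcases List.exists_mem_of_ne_nil l h with ⟨x, hx⟩
    have hx2 : x ∈ PySem.Set.ofList l := (PySem.Set.mem_ofList _ _).mpr hx
    intro he; rw [List.map_eq_nil_iff] at he; simp [he] at hx2
  obtain ⟨m, hm⟩ : ∃ m, PySem.List.max? (PySem.Dict.counter l (κ := Char)).values (fun v => v) = some m := by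
    rcases e : PySem.List.max? (PySem.Dict.counter l (κ := Char)).values (fun v => v) with _ | m
    · rw [PySem.List.max?_eq_none_iff] at e
      exact absurd e hne
    · exact ⟨m, rfl⟩
  rw [hm]
  congr 1
  have hmem := PySem.List.max?_mem hm
  have hmax := PySem.List.max?_isMax hm
  rw [hvals] at hmem
  obtain ⟨k, hk, rfl⟩ := List.mem_map.mp hmem
  have hkl : k ∈ l := (PySem.Set.mem_ofList _ _).mp hk
  obtain ⟨c, hc, hcnt⟩ := pvMaxFreq_mem l h
  have h1 : ((l.count k : Nat) : Int) ≤ pvMaxFreq l := pvMaxFreq_ub l k hkl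
  have h2 : ((l.count c : Nat) : Int) ≤ ((l.count k : Nat) : Int) := by
    apply hmax
    rw [hvals]
    exact List.mem_map.mpr ⟨c, (PySem.Set.mem_ofList _ _).mpr hc, rfl⟩
  omega

theorem adj_eq (r : List Char) :
    (PySem.List.pyRange 1 (r.length : Int) 1).any
      (fun i => PySem.List.pyGet? r i == PySem.List.pyGet? r (i - 1))
    = (r.zip (r.drop 1)).any (fun p => p.1 == p.2) := by
  rw [Bool.eq_iff_iff]
  simp only [List.any_eq_true]
  constructor
  · rintro ⟨i, hi, hp⟩
    rw [PySem.List.mem_pyRange_one] at hi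
    obtain ⟨h1, h2⟩ := hi
    -- i = j+1 with j+1 < r.length
    obtain ⟨j, rfl⟩ : ∃ j : Nat, i = (j : Int) + 1 := ⟨(i - 1).toNat, by omega⟩
    have hj : j + 1 < r.length := by exact_mod_cast h2
    refine ⟨(r[j], r[j+1]), ?_, ?_⟩
    · rw [List.mem_iff_getElem]
      refine ⟨j, by simp [List.length_zip]; omega, ?_⟩
      simp [List.getElem_zip]
    · have e1 : PySem.List.pyGet? r ((j:Int) + 1) = some r[j+1] := by
        have : ((j:Int) + 1) = ((j+1 : Nat) : Int) := by omega
        rw [this, PySem.List.pyGet?_natCast]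
        simp [hj]
      have e2 : PySem.List.pyGet? r ((j:Int) + 1 - 1) = some r[j] := by
        have : ((j:Int) + 1 - 1) = ((j : Nat) : Int) := by omega
        rw [this, PySem.List.pyGet?_natCast]
        simp [show j < r.length by omega]
      rw [e1, e2] at hp
      have hv : r[j+1] = r[j] := by simpa using hp
      simpa using hv.symm
  · rintro ⟨p, hp, he⟩
    rw [List.mem_iff_getElem] at hp
    obtain ⟨j, hj, rfl⟩ := hp
    have hj' : j + 1 < r.length := by
      simp [List.length_zip] at hj
      omega
    refine ⟨(j:Int) + 1, ?_, ?_⟩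
    · rw [PySem.List.mem_pyRange_one]
      constructor
      · omega
      · exact_mod_cast (show (j:Int)+1 < (r.length:Int) by exact_mod_cast hj')
    · have e1 : PySem.List.pyGet? r ((j:Int) + 1) = some r[j+1] := by
        have : ((j:Int) + 1) = ((j+1 : Nat) : Int) := by omega
        rw [this, PySem.List.pyGet?_natCast]
        simp [hj']
      have e2 : PySem.List.pyGet? r ((j:Int) + 1 - 1) = some r[j] := by
        have : ((j:Int) + 1 - 1) = ((j : Nat) : Int) := by omega
        rw [this, PySem.List.pyGet?_natCast]
        simp [show j < r.length by omega]
      rw [e1, e2]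
      simp [List.getElem_zip] at he
      simp [he]

theorem counterEq_eq_sortedEq (o r : List Char) :
    (PySem.Set.equal (PySem.Dict.counter o (κ := Char)).keys (PySem.Dict.counter r (κ := Char)).keys
      && (PySem.Dict.counter o (κ := Char)).keys.all
          (fun k => (PySem.Dict.counter o (κ := Char)).getD k 0 == (PySem.Dict.counter r (κ := Char)).getD k 0))
    = decide (PySem.List.sorted o (fun x => x) false = PySem.List.sorted r (fun x => x) false) := by
  rw [Bool.eq_iff_iff]
  simp only [Bool.and_eq_true, decide_eq_true_eq, PySem.Dict.keys_counter, List.all_eq_true,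
    PySem.Dict.getD_counter, beq_iff_eq, PySem.List.sorted_id_eq_sorted_id_iff_perm,
    List.perm_iff_count]
  constructor
  · rintro ⟨hset, hcnt⟩ c
    rw [PySem.Set.equal_iff] at hset
    by_cases hco : c ∈ o
    · have := hcnt c ((PySem.Set.mem_ofList _ _).mpr hco)
      exact_mod_cast this
    · have hcr : c ∉ r := fun hcr =>
        hco ((PySem.Set.mem_ofList _ _).mp ((hset c).mpr ((PySem.Set.mem_ofList _ _).mpr hcr)))
      rw [List.count_eq_zero_of_not_mem hco, List.count_eq_zero_of_not_mem hcr]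
  · intro hcnt
    have hmemiff : ∀ c, c ∈ o ↔ c ∈ r := by
      intro c
      rw [← List.count_pos_iff, ← List.count_pos_iff, hcnt c]
    refine ⟨?_, ?_⟩
    · rw [PySem.Set.equal_iff]
      intro x
      rw [PySem.Set.mem_ofList, PySem.Set.mem_ofList]
      exact hmemiff x
    · intro k _
      exact_mod_cast hcnt k

-- ===== VERDICT (by name: the statement is the Claim_ definition above) =====
theorem is_valid_reorganization_py_spec : Claim_equal_is_valid_reorganization_py := by
  intro original reorganized _
  unfold Spec_is_valid_reorganization_py is_valid_reorganization_py is_valid_reorganization_py_alt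
  by_cases h1 : (reorganized.toList.isEmpty && !original.toList.isEmpty) = true
  · rw [if_pos h1, if_pos h1,
      maxA_eq_maxFreq _ (by simp_all [List.isEmpty_iff])]
  · rw [if_neg h1, if_neg h1]
    by_cases h2 : (original.toList.length : Int) ≠ (reorganized.toList.length : Int)
    · rw [if_pos h2, if_pos h2]
    · rw [if_neg h2, if_neg h2, adj_eq, counterEq_eq_sortedEq]
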